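-- pv_equiv track=rewrite | github.com/C-o-m-o-n/sa_li | searlgo.py | search_list
-- ===== SOURCE A (Python) =====
-- def search_list(strings, pattern):
--     pattern = pattern.lower()  # To ensure case-insensitive search
--     pattern_length = len(pattern)
--     result = []
--
--     for index, string in enumerate(strings):
--         string_lower = string.lower()
--         string_length = len(string_lower)
--
--         # Naive search algorithm for the current string
--         for i in range(string_length - pattern_length + 1):
--             match = True
--             for j in range(pattern_length):
--                 if string_lower[i + j] != pattern[j]:
--                     match = False
--                     break
--             if match:
--                 result.append(index)
--                 break  # Move to the next string in the list after the first match
--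
--     return result
-- ===== SOURCE B (Python) =====
-- def search_list(strings, pattern):
--     # Rabin-Karp: roll a polynomial hash over each lowered string; verify
--     # characters only on a hash hit, record each string's index at most once.
--     pat = pattern.lower()
--     m = len(pat)
--     BASE = 257
--     MOD = (1 << 61) - 1
--     ph = 0
--     for c in pat:
--         ph = (ph * BASE + ord(c)) % MOD
--     pw = pow(BASE, m - 1, MOD) if m > 0 else 1
--     result = []
--     for index, s in enumerate(strings):
--         t = s.lower()
--         n = len(t)
--         if n < m:
--             continue
--         h = 0
--         for c in t[:m]:
--             h = (h * BASE + ord(c)) % MOD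
--         for i in range(n - m + 1):
--             if h == ph and t[i:i + m] == pat:
--                 result.append(index)
--                 break
--             if i + m < n:
--                 h = ((h - ord(t[i]) * pw) * BASE + ord(t[i + m])) % MOD
--     return result
-- ===== Notes on version B (the rewrite author's own statement) =====
-- stated objective: alternative
-- what changed: Replaces A's per-string naive nested character scan by a Rabin-Karp rolling polynomial hash (mod 2^61-1): the per-position inner character loop disappears and characters are compared only when the window hash equals the pattern hash.
import Mathlib
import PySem

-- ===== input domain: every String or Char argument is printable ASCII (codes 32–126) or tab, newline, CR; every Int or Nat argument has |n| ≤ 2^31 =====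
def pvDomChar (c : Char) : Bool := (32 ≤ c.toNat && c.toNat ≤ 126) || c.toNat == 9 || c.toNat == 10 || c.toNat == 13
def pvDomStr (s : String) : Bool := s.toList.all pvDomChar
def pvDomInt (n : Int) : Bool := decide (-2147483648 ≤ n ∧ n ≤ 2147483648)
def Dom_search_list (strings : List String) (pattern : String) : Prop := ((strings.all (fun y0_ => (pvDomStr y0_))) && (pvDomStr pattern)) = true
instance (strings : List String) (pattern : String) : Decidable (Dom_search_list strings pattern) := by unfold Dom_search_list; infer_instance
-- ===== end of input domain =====

-- B replaces A's per-string naive nested scan by a Rabin–Karp rolling-hash scan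
-- (characters are compared only on a hash hit); return values proved equal.

-- ===== PORT A =====
-- Literal transliteration of A's nested loops. Python's breaks are ported as
-- flag-folds (`fnd ||`, `m &&`): once the flag is set/cleared later iterations
-- change nothing, so the fold computes exactly what the break-loop computes.
-- string_lower[i+j] / pattern[j] are always in range in A (i + j < len, j < len),
-- so pyGetD with a dummy default is exact here.
def search_list (strings : List String) (pattern : String) : List Int :=
  let p := (PySem.Str.lower pattern).toList
  let plen := p.length
  (PySem.List.enumerate strings).foldl
    (fun result iv =>
      let sl := (PySem.Str.lower iv.2).toList
      let slen := sl.length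
      let found := (PySem.List.pyRange 0 ((slen : Int) - plen + 1)).foldl
        (fun fnd i =>
          fnd || ((PySem.List.pyRange 0 (plen : Int)).foldl
            (fun m j => m && (PySem.List.pyGetD sl (i + j) ' ' == PySem.List.pyGetD p j ' ')) true))
        false
      if found then result ++ [iv.1] else result)
    []

-- ===== PORT B =====
-- Source B: Rabin–Karp. rkM = (1 << 61) - 1, rkStep is one step of the hash fold
-- h = (h * BASE + ord(c)) % MOD; rkScan is the inner `for i in range(n-m+1)`
-- loop with its break (fuel = number of remaining positions, state = i, h);
-- the indexings t[i], t[i+m] are in range under the loop's own guard.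
def rkM : Int := 2305843009213693951

def rkStep (h : Int) (c : Char) : Int := PySem.Int.mod (h * 257 + (c.toNat : Int)) rkM

def rkScan (t p : List Char) (ph pw : Int) : Nat → Nat → Int → Bool
  | 0, _, _ => false
  | k+1, i, h =>
    if (h == ph) && (PySem.List.slice t (some (i : Int)) (some ((i : Int) + (p.length : Int))) == p) then
      true
    else if i + p.length < t.length then
      rkScan t p ph pw k (i+1)
        (PySem.Int.mod ((h - ((t.getD i ' ').toNat : Int) * pw) * 257
          + ((t.getD (i + p.length) ' ').toNat : Int)) rkM)
    else
      rkScan t p ph pw k (i+1) h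

def search_list_alt (strings : List String) (pattern : String) : List Int :=
  let p := (PySem.Str.lower pattern).toList
  let m := p.length
  let ph := p.foldl rkStep 0
  let pw := if 0 < m then PySem.Int.powMod 257 (m - 1) rkM else 1
  (PySem.List.enumerate strings).foldl
    (fun result iv =>
      let t := (PySem.Str.lower iv.2).toList
      let n := t.length
      if n < m then result
      else
        -- t[:m] is `t.take m` (PySem.List.slice_to_natCast)
        let h := (t.take m).foldl rkStep 0
        if rkScan t p ph pw (n - m + 1) 0 h then result ++ [iv.1] else result)
    []

-- ===== PRECONDITION & SPEC =====
def Spec_search_list (strings : List String) (pattern : String) (out : List Int) : Prop := out = search_list_alt strings pattern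
instance (strings : List String) (pattern : String) (out : List Int) : Decidable (Spec_search_list strings pattern out) := by unfold Spec_search_list; infer_instance

-- ===== CLAIM (what is proved, stated in full; the proofs are below) =====
def Claim_equal_search_list : Prop := ∀ (strings : List String) (pattern : String), Dom_search_list strings pattern → Spec_search_list strings pattern (search_list strings pattern)

-- ===== LEMMAS AND PROOFS =====

-- ---- A-side: the naive fold computes the substring test ----

lemma pv_foldl_or {α : Type} (f : α → Bool) :
    ∀ (xs : List α) (b : Bool), xs.foldl (fun acc x => acc || f x) b = (b || xs.any f)
  | [], b => by simp
  | x :: xs, b => by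
      simp [List.foldl_cons, List.any_cons, pv_foldl_or f xs, Bool.or_assoc]

lemma pv_foldl_and {α : Type} (f : α → Bool) :
    ∀ (xs : List α) (b : Bool), xs.foldl (fun acc x => acc && f x) b = (b && xs.all f)
  | [], b => by simp
  | x :: xs, b => by
      simp [List.foldl_cons, List.all_cons, pv_foldl_and f xs, Bool.and_assoc]

-- p is a prefix of sl.drop i  ↔  the characters A compares all agree
lemma pv_prefix_iff_getD (sl p : List Char) (i : Nat) (h : i + p.length ≤ sl.length) :
    p <+: sl.drop i ↔ ∀ k < p.length, sl.getD (i + k) ' ' = p.getD k ' ' := by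
  rw [List.prefix_iff_eq_take]
  have hlen : ((sl.drop i).take p.length).length = p.length := by
    simp only [List.length_take, List.length_drop]; omega
  constructor
  · intro hp k hk
    have h1 : i + k < sl.length := by omega
    conv_rhs => rw [hp]
    rw [List.getD_eq_getElem sl ' ' h1,
      List.getD_eq_getElem _ ' ' (by omega : k < ((sl.drop i).take p.length).length)]
    simp [List.getElem_take, List.getElem_drop]
  · intro hch
    apply List.ext_getElem (by omega)
    intro k h1 h2
    have h3 : i + k < sl.length := by omega
    have := hch k h1
    rw [List.getD_eq_getElem sl ' ' h3, List.getD_eq_getElem p ' ' h1] at this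
    simpa [List.getElem_take, List.getElem_drop] using this.symm

-- A's per-string scan computes exactly the substring test
lemma pv_found_eq (sl p : List Char) :
    ((PySem.List.pyRange 0 ((sl.length : Int) - p.length + 1)).foldl
      (fun fnd i =>
        fnd || ((PySem.List.pyRange 0 (p.length : Int)).foldl
          (fun m j => m && (PySem.List.pyGetD sl (i + j) ' ' == PySem.List.pyGetD p j ' ')) true))
      false)
    = PySem.Chars.isIn p sl := by
  rw [pv_foldl_or, Bool.false_or, Bool.eq_iff_iff]
  rw [← PySem.Chars.exists_prefix_drop_iff_isIn, List.any_eq_true]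
  constructor
  · rintro ⟨i, hmem, hin⟩
    obtain ⟨hi0, hilt⟩ := PySem.List.mem_pyRange_one.mp hmem
    rw [pv_foldl_and, Bool.true_and, List.all_eq_true] at hin
    have hle : i.toNat + p.length ≤ sl.length := by omega
    refine ⟨i.toNat, (pv_prefix_iff_getD sl p i.toNat hle).mpr ?_⟩
    intro k hk
    have hkin := hin (k : Int) (PySem.List.mem_pyRange_one.mpr ⟨by omega, by omega⟩)
    have hcast : i + (k : Int) = ((i.toNat + k : Nat) : Int) := by omega
    rw [hcast, PySem.List.pyGetD_natCast, PySem.List.pyGetD_natCast] at hkin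
    exact beq_iff_eq.mp hkin
  · rintro ⟨j, hj⟩
    set n := min j sl.length with hn
    have hp : p <+: sl.drop n := by
      by_cases hle : j ≤ sl.length
      · simpa [hn, Nat.min_eq_left hle] using hj
      · have : sl.drop j = [] := List.drop_eq_nil_of_le (by omega)
        rw [this] at hj
        have : p = [] := List.prefix_nil.mp hj
        simp [this]
    have hlen : p.length ≤ (sl.drop n).length := hp.length_le
    rw [List.length_drop] at hlen
    have hn2 : n ≤ sl.length := by omega
    have hle : n + p.length ≤ sl.length := by omega
    refine ⟨(n : Int), PySem.List.mem_pyRange_one.mpr ⟨by omega, by omega⟩, ?_⟩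
    rw [pv_foldl_and, Bool.true_and, List.all_eq_true]
    intro j hjm
    obtain ⟨hj0, hjlt⟩ := PySem.List.mem_pyRange_one.mp hjm
    obtain ⟨k, rfl⟩ : ∃ k : Nat, j = (k : Int) := ⟨j.toNat, by omega⟩
    have hcast : (n : Int) + (k : Int) = ((n + k : Nat) : Int) := by push_cast; ring
    rw [hcast, PySem.List.pyGetD_natCast, PySem.List.pyGetD_natCast]
    exact beq_iff_eq.mpr ((pv_prefix_iff_getD sl p n hle).mp hp k (by omega))

-- ---- B-side: the rolling-hash scan computes the same substring test ----

-- the raw (un-reduced) polynomial hash with accumulator a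
def rkPolyF (a : Int) (cs : List Char) : Int := cs.foldl (fun a c => a * 257 + (c.toNat : Int)) a

lemma rkM_pos : (0 : Int) < rkM := by norm_num [rkM]

lemma pv_mod_rkM (x : Int) : PySem.Int.mod x rkM = x % rkM :=
  PySem.Int.mod_eq_emod_of_pos rkM_pos

lemma pv_emod_modeq (a : Int) : a % rkM ≡ a [ZMOD rkM] := Int.emod_emod_of_dvd a dvd_rfl

lemma rkPolyF_eq : ∀ (cs : List Char) (a : Int), rkPolyF a cs = a * 257 ^ cs.length + rkPolyF 0 cs
  | [], a => by simp [rkPolyF]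
  | c :: cs, a => by
      show rkPolyF (a * 257 + (c.toNat : Int)) cs
        = a * 257 ^ (cs.length + 1) + rkPolyF ((0 : Int) * 257 + (c.toNat : Int)) cs
      rw [rkPolyF_eq cs (a * 257 + (c.toNat : Int)), rkPolyF_eq cs ((0 : Int) * 257 + (c.toNat : Int))]
      ring

lemma rkPolyF_append_singleton (cs : List Char) (d : Char) :
    rkPolyF 0 (cs ++ [d]) = rkPolyF 0 cs * 257 + (d.toNat : Int) := by
  simp [rkPolyF, List.foldl_append]

-- the mod-reduced fold equals the raw polynomial reduced once
lemma rk_fold_mod : ∀ (cs : List Char) (a : Int), cs.foldl rkStep (a % rkM) = rkPolyF a cs % rkM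
  | [], a => by simp [rkPolyF]
  | c :: cs, a => by
      have hstep : rkStep (a % rkM) c = (a * 257 + (c.toNat : Int)) % rkM := by
        rw [rkStep, pv_mod_rkM]
        exact ((pv_emod_modeq a).mul_right 257).add_right _
      show cs.foldl rkStep (rkStep (a % rkM) c) = rkPolyF (a * 257 + (c.toNat : Int)) cs % rkM
      rw [hstep, rk_fold_mod cs (a * 257 + (c.toNat : Int))]

lemma rk_fold_mod_zero (cs : List Char) : cs.foldl rkStep 0 = rkPolyF 0 cs % rkM := by
  have := rk_fold_mod cs 0
  rwa [Int.zero_emod] at this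

-- one rolling step moves the window hash from position i to i+1
lemma rk_roll (t : List Char) (m i : Nat) (hm : 1 ≤ m) (hin : i + m < t.length) :
    PySem.Int.mod ((rkPolyF 0 ((t.drop i).take m) % rkM
        - ((t.getD i ' ').toNat : Int) * ((257 ^ (m - 1) : Int) % rkM)) * 257
        + ((t.getD (i + m) ' ').toNat : Int)) rkM
      = rkPolyF 0 ((t.drop (i+1)).take m) % rkM := by
  have hi : i < t.length := by omega
  have him : i + m < t.length := hin
  set c := t.getD i ' ' with hc
  set d := t.getD (i + m) ' ' with hd
  set ws := (t.drop (i+1)).take (m-1) with hws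
  have hwslen : ws.length = m - 1 := by
    simp only [hws, List.length_take, List.length_drop]; omega
  have hw : (t.drop i).take m = c :: ws := by
    have hdrop : t.drop i = t[i] :: t.drop (i+1) := List.drop_eq_getElem_cons hi
    have hcg : c = t[i] := by rw [hc, List.getD_eq_getElem t ' ' hi]
    rw [hdrop, ← hcg]
    obtain ⟨m', rfl⟩ : ∃ m', m = m' + 1 := ⟨m - 1, by omega⟩
    simp [hws, List.take_succ_cons]
  have hw' : (t.drop (i+1)).take m = ws ++ [d] := by
    obtain ⟨m', rfl⟩ : ∃ m', m = m' + 1 := ⟨m - 1, by omega⟩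
    have hm' : (m' : Nat) = m' + 1 - 1 := by omega
    have hidx : (t.drop (i+1))[m']? = some d := by
      rw [List.getElem?_drop, hd, List.getD_eq_getElem t ' ' (by omega)]
      rw [List.getElem?_eq_getElem (by omega : i + 1 + m' < t.length)]
      congr 1; congr 1; omega
    rw [List.take_add_one, hidx, hws, ← hm']
    simp
  -- raw identity
  have hraw : (rkPolyF 0 ((t.drop i).take m) - (c.toNat : Int) * 257 ^ (m - 1)) * 257
      + (d.toNat : Int) = rkPolyF 0 ((t.drop (i+1)).take m) := by
    rw [hw, hw', rkPolyF_append_singleton]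
    show (rkPolyF ((0 : Int) * 257 + (c.toNat : Int)) ws - _) * 257 + _ = _
    rw [rkPolyF_eq ws ((0 : Int) * 257 + (c.toNat : Int)), hwslen]
    ring
  rw [pv_mod_rkM]
  have hcong : (rkPolyF 0 ((t.drop i).take m) % rkM
        - (c.toNat : Int) * ((257 ^ (m - 1) : Int) % rkM)) * 257 + (d.toNat : Int)
      ≡ (rkPolyF 0 ((t.drop i).take m) - (c.toNat : Int) * 257 ^ (m - 1)) * 257
        + (d.toNat : Int) [ZMOD rkM] :=
    (((pv_emod_modeq _).sub ((Int.ModEq.refl _).mul (pv_emod_modeq _))).mul_right 257).add_right _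
  rw [hcong, hraw]

-- the scan finds a match iff some window in the remaining positions equals p
lemma rkScan_iff (t p : List Char) (pw : Int)
    (hpw : p ≠ [] → pw = (257 ^ (p.length - 1) : Int) % rkM) :
    ∀ (k i : Nat), i + k + p.length = t.length + 1 →
      (rkScan t p (rkPolyF 0 p % rkM) pw k i (rkPolyF 0 ((t.drop i).take p.length) % rkM) = true
        ↔ ∃ j < k, (t.drop (i + j)).take p.length = p)
  | 0, i, _ => by simp [rkScan]
  | k+1, i, hinv => by
      rw [rkScan]
      rw [PySem.List.slice_natCast_add]
      by_cases hw : (t.drop i).take p.length = p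
      · have : ((rkPolyF 0 ((t.drop i).take p.length) % rkM == rkPolyF 0 p % rkM)
            && ((t.drop i).take p.length == p)) = true := by
          rw [hw]; simp
        rw [this]
        simp only [if_true]
        exact ⟨fun _ => ⟨0, by omega, by simpa using hw⟩, fun _ => by trivial⟩
      · have hcond : ((rkPolyF 0 ((t.drop i).take p.length) % rkM == rkPolyF 0 p % rkM)
            && ((t.drop i).take p.length == p)) = false := by
          have : ((t.drop i).take p.length == p) = false := by
            simp [beq_eq_false_iff_ne, hw]
          simp [this]
        rw [hcond]
        simp only [Bool.false_eq_true, if_false]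
        by_cases hlt : i + p.length < t.length
        · have hpne : p ≠ [] := by
            intro hnil
            apply hw
            simp [hnil]
          rw [if_pos hlt, hpw hpne, rk_roll t p.length i (by
            cases p with
            | nil => exact absurd rfl hpne
            | cons a l => simp) hlt]
          have IH := rkScan_iff t p pw hpw k (i+1) (by omega)
          rw [hpw hpne] at IH
          rw [IH]
          constructor
          · rintro ⟨j, hj, hjw⟩
            exact ⟨j + 1, by omega, by rw [show i + (j+1) = i + 1 + j by omega]; exact hjw⟩
          · rintro ⟨j, hj, hjw⟩
            match j with
            | 0 => exact absurd (by simpa using hjw) hw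
            | j + 1 => exact ⟨j, by omega, by rw [show i + 1 + j = i + (j+1) by omega]; exact hjw⟩
        · have hk0 : k = 0 := by omega
          rw [if_neg hlt, hk0]
          simp only [rkScan, Bool.false_eq_true, false_iff]
          rintro ⟨j, hj, hjw⟩
          interval_cases j
          exact hw hjw
      termination_by k => k

-- windows-equal ↔ substring, for n ≥ m
lemma pv_exists_window_iff (t p : List Char) (hnm : p.length ≤ t.length) :
    (∃ j < t.length - p.length + 1, (t.drop j).take p.length = p)
      ↔ PySem.Chars.isIn p t = true := by
  rw [← PySem.Chars.exists_prefix_drop_iff_isIn]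
  constructor
  · rintro ⟨j, _, hjw⟩
    exact ⟨j, by rw [← hjw]; exact ⟨(t.drop j).drop p.length, by simp⟩⟩
  · rintro ⟨j, hj⟩
    by_cases hle : j ≤ t.length - p.length
    · exact ⟨j, by omega, (List.prefix_iff_eq_take.mp hj).symm⟩
    · have hlen := hj.length_le
      rw [List.length_drop] at hlen
      have hp0 : p.length = 0 := by omega
      exact ⟨0, by omega, by simp [List.eq_nil_of_length_eq_zero hp0]⟩

-- n < m ⇒ no substring
lemma pv_isIn_false_of_short (t p : List Char) (h : t.length < p.length) :
    PySem.Chars.isIn p t = false := by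
  rw [PySem.Chars.isIn_eq_false_iff]
  intro hin
  exact absurd hin.length_le (by omega)

-- B's per-string computation equals the substring test
lemma pv_alt_found_eq (t p : List Char) :
    (if t.length < p.length then false
     else rkScan t p (p.foldl rkStep 0)
        (if 0 < p.length then PySem.Int.powMod 257 (p.length - 1) rkM else 1)
        (t.length - p.length + 1) 0 ((t.take p.length).foldl rkStep 0))
      = PySem.Chars.isIn p t := by
  by_cases hnm : t.length < p.length
  · rw [if_pos hnm, pv_isIn_false_of_short t p hnm]
  · rw [if_neg hnm]
    replace hnm := Nat.le_of_not_lt hnm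
    have hpw : p ≠ [] → (if 0 < p.length then PySem.Int.powMod 257 (p.length - 1) rkM else 1)
        = (257 ^ (p.length - 1) : Int) % rkM := by
      intro hne
      rw [if_pos (by cases p with | nil => exact absurd rfl hne | cons a l => simp)]
      rw [PySem.Int.powMod, pv_mod_rkM]
    rw [rk_fold_mod_zero p, rk_fold_mod_zero (t.take p.length)]
    have ht0 : t.take p.length = (t.drop 0).take p.length := by simp
    rw [ht0, Bool.eq_iff_iff,
      rkScan_iff t p _ hpw (t.length - p.length + 1) 0 (by omega),
      ← pv_exists_window_iff t p hnm]
    simp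

-- ===== VERDICT (by name: the statement is the Claim_ definition above) =====
theorem search_list_spec : Claim_equal_search_list := by
  intro strings pattern _
  unfold Spec_search_list search_list search_list_alt
  show List.foldl
      (fun (result : List Int) (iv : Int × String) =>
        if ((PySem.List.pyRange 0 ((((PySem.Str.lower iv.2).toList).length : Int) - ((PySem.Str.lower pattern).toList).length + 1)).foldl
          (fun fnd i =>
            fnd || ((PySem.List.pyRange 0 (((PySem.Str.lower pattern).toList).length : Int)).foldl
              (fun m j => m && (PySem.List.pyGetD ((PySem.Str.lower iv.2).toList) (i + j) ' ' == PySem.List.pyGetD ((PySem.Str.lower pattern).toList) j ' ')) true))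
          false)
        then result ++ [iv.1] else result)
      [] (PySem.List.enumerate strings)
    = List.foldl
      (fun (result : List Int) (iv : Int × String) =>
        if ((PySem.Str.lower iv.2).toList).length < ((PySem.Str.lower pattern).toList).length then result
        else if rkScan ((PySem.Str.lower iv.2).toList) ((PySem.Str.lower pattern).toList)
            (((PySem.Str.lower pattern).toList).foldl rkStep 0)
            (if 0 < ((PySem.Str.lower pattern).toList).length
              then PySem.Int.powMod 257 (((PySem.Str.lower pattern).toList).length - 1) rkM else 1)
            (((PySem.Str.lower iv.2).toList).length - ((PySem.Str.lower pattern).toList).length + 1) 0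
            ((((PySem.Str.lower iv.2).toList).take ((PySem.Str.lower pattern).toList).length).foldl rkStep 0)
          then result ++ [iv.1] else result)
      [] (PySem.List.enumerate strings)
  have hA :
      (fun (result : List Int) (iv : Int × String) =>
        if ((PySem.List.pyRange 0 ((((PySem.Str.lower iv.2).toList).length : Int) - ((PySem.Str.lower pattern).toList).length + 1)).foldl
          (fun fnd i =>
            fnd || ((PySem.List.pyRange 0 (((PySem.Str.lower pattern).toList).length : Int)).foldl
              (fun m j => m && (PySem.List.pyGetD ((PySem.Str.lower iv.2).toList) (i + j) ' ' == PySem.List.pyGetD ((PySem.Str.lower pattern).toList) j ' ')) true))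
          false)
        then result ++ [iv.1] else result)
      = (fun (result : List Int) (iv : Int × String) =>
          if PySem.Chars.isIn ((PySem.Str.lower pattern).toList) ((PySem.Str.lower iv.2).toList)
            then result ++ [iv.1] else result) := by
    funext result iv
    rw [pv_found_eq]
  have hB :
      (fun (result : List Int) (iv : Int × String) =>
        if ((PySem.Str.lower iv.2).toList).length < ((PySem.Str.lower pattern).toList).length then result
        else if rkScan ((PySem.Str.lower iv.2).toList) ((PySem.Str.lower pattern).toList)
            (((PySem.Str.lower pattern).toList).foldl rkStep 0)
            (if 0 < ((PySem.Str.lower pattern).toList).length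
              then PySem.Int.powMod 257 (((PySem.Str.lower pattern).toList).length - 1) rkM else 1)
            (((PySem.Str.lower iv.2).toList).length - ((PySem.Str.lower pattern).toList).length + 1) 0
            ((((PySem.Str.lower iv.2).toList).take ((PySem.Str.lower pattern).toList).length).foldl rkStep 0)
          then result ++ [iv.1] else result)
      = (fun (result : List Int) (iv : Int × String) =>
          if PySem.Chars.isIn ((PySem.Str.lower pattern).toList) ((PySem.Str.lower iv.2).toList)
            then result ++ [iv.1] else result) := by
    funext result iv
    rw [← pv_alt_found_eq ((PySem.Str.lower iv.2).toList) ((PySem.Str.lower pattern).toList)]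
    by_cases h : ((PySem.Str.lower iv.2).toList).length < ((PySem.Str.lower pattern).toList).length
    · simp only [if_pos h, Bool.false_eq_true, if_false]
    · simp only [if_neg h]
  rw [hA, hB]
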